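-- pv_equiv track=rewrite | github.com/MukundaJ/APS | Problems/Cryptopangrams/cryptopangrams.py | solve_cryptopangram
-- ===== SOURCE A (Python) =====
-- from math import gcd
-- from string import ascii_uppercase
--
-- def solve_cryptopangram(ciphers: [int]) -> str:
--     """
--     Decodes the given list of ciphers into the message.
--     :param ciphers: A list of products (of two primes).
--     :return: The decoded message.
--     """
--     # Find the index of the next dissimilar ciphers.
--     idx = next(
--         index for index, cipher in enumerate(ciphers) if cipher != ciphers[0])
--
--     # Find the gcd of the first and the next dissimilar ciphers.
--     _gcd = gcd(ciphers[0], ciphers[idx])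
--
--     # Record all prime factors encountered so far.
--     # All ciphers upto idx can be expressed as a product of the two primes,
--     # _gcd and (c[0] // _gcd).
--     # As long as these two primes are in our initial primes list, we're good !
--     # (i.e. we've recorded all the primes seen at least once)
--     # We record 1 prime for each cipher as below, making sure to include _gcd
--     # and (c[0] // _gcd) as promised above.
--     primes = (idx + 1) % 2 * [_gcd] + (idx + 1) // 2 * [ciphers[0] // _gcd,
--                                                         _gcd]
--
--     for cipher in ciphers[idx:]:
--         # Get the second prime for the next dissimilar cipher
--         _gcd = cipher // _gcd
--         primes.append(_gcd)
--
--     # Create a decode dictionary.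
--     decode = dict(zip(sorted(set(primes)), ascii_uppercase))
--
--     # Return decoded result.
--     return "".join(decode[prime] for prime in primes)
-- ===== SOURCE B (Python) =====
-- from math import gcd
-- from string import ascii_uppercase
--
-- def solve_cryptopangram(ciphers: [int]) -> str:
--     """
--     Decodes the given list of ciphers into the message.
--     Same gcd pivot, but the factor chain is reconstructed by explicit
--     division passes (a backward pass for the prefix, a forward pass for
--     the suffix) instead of A's parity-based prefix formula.
--     """
--     # Index of the first cipher dissimilar from the first one.
--     idx = next(
--         index for index, cipher in enumerate(ciphers) if cipher != ciphers[0])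
--
--     g = gcd(ciphers[0], ciphers[idx])
--
--     # The chain of primes, seeded with the pivot prime at position idx.
--     chain = [g]
--
--     # Backward pass: divide each earlier cipher by the prime to its right.
--     for cipher in reversed(ciphers[:idx]):
--         chain = [cipher // chain[0]] + chain
--
--     # Forward pass: divide each remaining cipher by the prime to its left.
--     for cipher in ciphers[idx:]:
--         chain.append(cipher // chain[-1])
--
--     decode = dict(zip(sorted(set(chain)), ascii_uppercase))
--     return "".join(decode[p] for p in chain)
-- ===== Notes on version B (the rewrite author's own statement) =====
-- stated objective: alternative
-- what changed: A builds the prefix of the prime chain with a parity-arithmetic closed form ((idx+1)%2*[g] + (idx+1)//2*[q,g]) and one forward loop carrying _gcd; B instead reconstructs the chain by two explicit division passes, a backward pass dividing each earlier (equal) cipher by the factor to its right and a forward pass dividing by chain[-1].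
-- outside the precondition, e.g. on solve_cryptopangram([0, 0, 1]): A returns 'BABB', B raises ZeroDivisionError
import Mathlib
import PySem

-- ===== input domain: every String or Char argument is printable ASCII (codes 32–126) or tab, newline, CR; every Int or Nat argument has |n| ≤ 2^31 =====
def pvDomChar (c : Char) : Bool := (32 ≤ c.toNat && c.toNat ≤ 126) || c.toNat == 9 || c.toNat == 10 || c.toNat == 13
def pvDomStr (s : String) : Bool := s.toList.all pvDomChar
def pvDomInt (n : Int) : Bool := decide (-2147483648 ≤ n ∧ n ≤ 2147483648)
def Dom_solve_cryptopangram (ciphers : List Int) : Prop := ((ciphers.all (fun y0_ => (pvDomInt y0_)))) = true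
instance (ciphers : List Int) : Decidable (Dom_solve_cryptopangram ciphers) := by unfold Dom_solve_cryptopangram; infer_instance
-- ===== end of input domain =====

-- B replaces A's parity-based closed-form prefix with explicit backward/forward division
-- passes over the cipher list (objective: alternative decomposition, same cost).

-- ===== PORT A =====
def solve_cryptopangram (ciphers : List Int) : String :=
  -- idx = next(index for index, cipher in enumerate(ciphers) if cipher != ciphers[0])
  -- (Python raises StopIteration when no dissimilar cipher exists;
  --  excluded by Pre_, the port returns "" there)
  match ciphers.findIdx? (fun cipher => cipher != PySem.List.pyGetD ciphers 0 0) with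
  | none => ""
  | some idx =>
    -- _gcd = gcd(ciphers[0], ciphers[idx])
    let g0 : Int := Int.gcd (PySem.List.pyGetD ciphers 0 0) (PySem.List.pyGetD ciphers (idx : Int) 0)
    -- primes = (idx + 1) % 2 * [_gcd] + (idx + 1) // 2 * [ciphers[0] // _gcd, _gcd]
    let primes0 : List Int :=
      PySem.List.pyRepeat [g0] (((idx + 1) % 2 : Nat) : Int) ++
        PySem.List.pyRepeat [PySem.Int.floordiv (PySem.List.pyGetD ciphers 0 0) g0, g0]
          (((idx + 1) / 2 : Nat) : Int)
    -- for cipher in ciphers[idx:]: _gcd = cipher // _gcd; primes.append(_gcd)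
    let st := (PySem.List.slice ciphers (some (idx : Int)) none).foldl
      (fun (st : List Int × Int) cipher =>
        let g' := PySem.Int.floordiv cipher st.2
        (st.1 ++ [g'], g')) (primes0, g0)
    -- decode = dict(zip(sorted(set(primes)), ascii_uppercase))
    let decode : PySem.Dict Int Char :=
      PySem.Dict.ofList ((PySem.List.sorted (PySem.Set.ofList st.1) (fun x => x) false).zip
        "ABCDEFGHIJKLMNOPQRSTUVWXYZ".toList)
    -- "".join(decode[prime] for prime in primes)  (KeyError — >26 distinct factors — excluded by Pre_)
    String.ofList (st.1.map (fun prime => (decode.get? prime).getD ' '))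

-- ===== PORT B =====
def solve_cryptopangram_alt (ciphers : List Int) : String :=
  -- idx = next(index for index, cipher in enumerate(ciphers) if cipher != ciphers[0])
  match ciphers.findIdx? (fun cipher => cipher != PySem.List.pyGetD ciphers 0 0) with
  | none => ""
  | some idx =>
    -- g = gcd(ciphers[0], ciphers[idx]); chain = [g]
    let g0 : Int := Int.gcd (PySem.List.pyGetD ciphers 0 0) (PySem.List.pyGetD ciphers (idx : Int) 0)
    -- for cipher in reversed(ciphers[:idx]): chain = [cipher // chain[0]] + chain
    let chain1 := ((PySem.List.slice ciphers none (some (idx : Int))).reverse).foldl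
      (fun chain cipher => [PySem.Int.floordiv cipher (PySem.List.pyGetD chain 0 0)] ++ chain) [g0]
    -- for cipher in ciphers[idx:]: chain.append(cipher // chain[-1])
    let chain2 := (PySem.List.slice ciphers (some (idx : Int)) none).foldl
      (fun chain cipher => chain ++ [PySem.Int.floordiv cipher (PySem.List.pyGetD chain (-1) 0)]) chain1
    -- decode = dict(zip(sorted(set(chain)), ascii_uppercase))
    let decode : PySem.Dict Int Char :=
      PySem.Dict.ofList ((PySem.List.sorted (PySem.Set.ofList chain2) (fun x => x) false).zip
        "ABCDEFGHIJKLMNOPQRSTUVWXYZ".toList)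
    -- "".join(decode[p] for p in chain)
    String.ofList (chain2.map (fun p => (decode.get? p).getD ' '))

-- ===== PRECONDITION & SPEC =====

-- Helper for Pre_ only (not used by either port): the chain of factors A reconstructs,
-- written in closed form — alternating prefix, then the forward division values.
def pvTail (p : Int) : List Int → List Int
  | [] => []
  | c :: l => PySem.Int.floordiv c p :: pvTail (PySem.Int.floordiv c p) l

def pvChain (ciphers : List Int) : List Int :=
  let c0 := PySem.List.pyGetD ciphers 0 0
  let idx := (ciphers.findIdx? (fun c => c != c0)).getD ciphers.length
  let g : Int := Int.gcd c0 (ciphers.getD idx 0)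
  let q := PySem.Int.floordiv c0 g
  (List.ofFn (fun j : Fin idx => if (idx - j.1) % 2 = 0 then g else q)) ++ (g :: pvTail g (ciphers.drop idx))

-- Pre_ excludes (i) the inputs where A raises: lists with no cipher dissimilar from the first
-- (StopIteration), a zero divisor inside the reconstructed factor chain
-- (ZeroDivisionError), or more than 26 distinct chain values (KeyError past ascii_uppercase);
-- and (ii) lists starting with two or more zeros followed by a nonzero cipher, where A returns
-- a meaningless decoding of a zero chain while B's backward pass raises ZeroDivisionError.
def Pre_solve_cryptopangram (ciphers : List Int) : Prop :=
  ((ciphers.findIdx? (fun c => c != PySem.List.pyGetD ciphers 0 0)).isSome = true) ∧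
  (PySem.List.pyGetD ciphers 0 0 ≠ 0 ∨
    (ciphers.findIdx? (fun c => c != PySem.List.pyGetD ciphers 0 0)).getD 0 ≤ 1) ∧
  (0 : Int) ∉ ((pvChain ciphers).drop
      ((ciphers.findIdx? (fun c => c != PySem.List.pyGetD ciphers 0 0)).getD 0)).dropLast ∧
  (PySem.Set.ofList (pvChain ciphers)).length ≤ 26

instance (ciphers : List Int) : Decidable (Pre_solve_cryptopangram ciphers) := by
  unfold Pre_solve_cryptopangram; infer_instance

def pvWitness_solve_cryptopangram : List Int := [6, 15]

def Spec_solve_cryptopangram (ciphers : List Int) (out : String) : Prop := out = solve_cryptopangram_alt ciphers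
instance (ciphers : List Int) (out : String) : Decidable (Spec_solve_cryptopangram ciphers out) := by unfold Spec_solve_cryptopangram; infer_instance

-- ===== CLAIM (what is proved, stated in full; the proofs are below) =====
def Claim_equal_solve_cryptopangram : Prop := ∀ (ciphers : List Int), Dom_solve_cryptopangram ciphers → Pre_solve_cryptopangram ciphers → Spec_solve_cryptopangram ciphers (solve_cryptopangram ciphers)

-- ===== LEMMAS AND PROOFS =====

-- Python list repetition with a Nat count.
theorem pvRepeat_natCast {α : Type} (xs : List α) (n : Nat) :
    PySem.List.pyRepeat xs (n : Int) = (List.replicate n xs).flatten := by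
  simp [PySem.List.pyRepeat]

-- A's fold (list-so-far, carried last factor) computes the same list as B's
-- append-reading-the-last-element fold, from a state whose last element is the carry.
theorem pv_fwd_eq : ∀ (l acc : List Int) (p : Int),
    (l.foldl (fun (st : List Int × Int) cipher =>
        let g' := PySem.Int.floordiv cipher st.2
        (st.1 ++ [g'], g')) (acc ++ [p], p)).1
    = l.foldl (fun chain cipher =>
        chain ++ [PySem.Int.floordiv cipher (PySem.List.pyGetD chain (-1) 0)]) (acc ++ [p])
  | [], acc, p => rfl
  | c :: l, acc, p => by
    simp only [List.foldl_cons, PySem.List.pyGetD_neg_one_append_singleton]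
    have h := pv_fwd_eq l (acc ++ [p]) (PySem.Int.floordiv c p)
    simpa [List.append_assoc] using h

-- B's backward pass over k equal ciphers c0 produces A's parity-pattern prefix.
theorem pv_back_pattern (c0 g q : Int) (hq : PySem.Int.floordiv c0 g = q)
    (hg : PySem.Int.floordiv c0 q = g) : ∀ k : Nat,
    (List.replicate k c0).foldl
        (fun chain cipher => [PySem.Int.floordiv cipher (PySem.List.pyGetD chain 0 0)] ++ chain) [g]
    = (List.replicate ((k + 1) % 2) [g]).flatten ++ (List.replicate ((k + 1) / 2) [q, g]).flatten := by
  intro k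
  induction k with
  | zero => simp
  | succ k ih =>
    rw [List.replicate_succ' (n := k), List.foldl_append, ih]
    rcases Nat.even_or_odd k with ⟨m, hm⟩ | ⟨m, hm⟩
    · subst hm
      have e1 : (m + m + 1) % 2 = 1 := by omega
      have e2 : (m + m + 1 + 1) % 2 = 0 := by omega
      have e3 : (m + m + 1 + 1) / 2 = (m + m + 1) / 2 + 1 := by omega
      rw [e1, e2, e3, List.replicate_succ (n := (m + m + 1) / 2)]
      simp [hq]
    · subst hm
      have e1 : (2 * m + 1 + 1) % 2 = 0 := by omega
      have e2 : (2 * m + 1 + 1) / 2 = m + 1 := by omega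
      have e3 : (2 * m + 1 + 1 + 1) % 2 = 1 := by omega
      have e4 : (2 * m + 1 + 1 + 1) / 2 = m + 1 := by omega
      rw [e1, e2, e3, e4, List.replicate_succ (n := m)]
      simp [hg]

-- The parity pattern of length k+2 ends with the pivot factor g.
theorem pv_pattern_concat (g q : Int) (k : Nat) :
    ∃ acc, (List.replicate ((k + 1 + 1) % 2) [g]).flatten ++
        (List.replicate ((k + 1 + 1) / 2) [q, g]).flatten = acc ++ [g] := by
  have h : (k + 1 + 1) / 2 = ((k + 1 + 1) / 2 - 1) + 1 := by omega
  rw [h, List.replicate_succ' (n := (k + 1 + 1) / 2 - 1), List.flatten_append]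
  exact ⟨(List.replicate ((k + 1 + 1) % 2) [g]).flatten ++
      (List.replicate ((k + 1 + 1) / 2 - 1) [q, g]).flatten ++ [q], by simp⟩

-- ===== VERDICT (by name: the statement is the Claim_ definition above) =====
theorem solve_cryptopangram_spec : Claim_equal_solve_cryptopangram := by
  intro ciphers _ hpre
  obtain ⟨h1, h2, -, -⟩ := hpre
  obtain ⟨idx, hfi⟩ := Option.isSome_iff_exists.mp h1
  obtain ⟨hlt, hfidx⟩ := List.findIdx?_eq_some_iff_findIdx_eq.mp hfi
  have hj : ∀ j (h : j < idx), ciphers[j]'(by omega) = PySem.List.pyGetD ciphers 0 0 := by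
    intro j hjlt
    have h := List.not_of_lt_findIdx (p := (fun c => c != PySem.List.pyGetD ciphers 0 0))
      (xs := ciphers) (i := j) (by omega)
    simpa using h
  have htake : PySem.List.slice ciphers none (some (idx : Int)) =
      List.replicate idx (PySem.List.pyGetD ciphers 0 0) := by
    rw [PySem.List.slice_to_natCast]
    refine List.eq_replicate_iff.mpr ⟨by simp; omega, ?_⟩
    intro b hb
    obtain ⟨j, hjl, hget⟩ := List.mem_iff_getElem.mp hb
    have hjlt : j < idx := by simp at hjl; omega
    rw [← hget, List.getElem_take]
    exact hj j hjlt
  have hidx1 : 1 ≤ idx := by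
    rcases Nat.eq_zero_or_pos idx with h0 | h0
    · exfalso
      have hp := List.findIdx_getElem (p := (fun c => c != PySem.List.pyGetD ciphers 0 0))
        (xs := ciphers) (w := by rw [hfidx]; omega)
      rw [getElem_congr rfl hfidx (hfidx ▸ hlt)] at hp
      have hc0 : PySem.List.pyGetD ciphers 0 0 = ciphers[0]'(by omega) := by
        rw [PySem.List.pyGetD_zero, List.getD_eq_getElem _ _ (by omega)]
      subst h0
      simp [hc0] at hp
    · omega
  -- the backward pass yields A's parity-pattern prefix
  have hback : (((PySem.List.slice ciphers none (some (idx : Int))).reverse).foldl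
      (fun chain cipher => [PySem.Int.floordiv cipher (PySem.List.pyGetD chain 0 0)] ++ chain)
      [(Int.gcd (PySem.List.pyGetD ciphers 0 0) (PySem.List.pyGetD ciphers (idx : Int) 0) : Int)])
      = (List.replicate ((idx + 1) % 2)
          [(Int.gcd (PySem.List.pyGetD ciphers 0 0) (PySem.List.pyGetD ciphers (idx : Int) 0) : Int)]).flatten ++
        (List.replicate ((idx + 1) / 2)
          [PySem.Int.floordiv (PySem.List.pyGetD ciphers 0 0)
            (Int.gcd (PySem.List.pyGetD ciphers 0 0) (PySem.List.pyGetD ciphers (idx : Int) 0) : Int),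
           (Int.gcd (PySem.List.pyGetD ciphers 0 0) (PySem.List.pyGetD ciphers (idx : Int) 0) : Int)]).flatten := by
    rw [htake, List.reverse_replicate]
    rcases Nat.lt_or_ge idx 2 with hsm | hge2
    · have h1 : idx = 1 := by omega
      subst h1
      simp [PySem.List.pyGetD_zero_cons]
    · -- idx ≥ 2 : Pre_ gives ciphers[0] ≠ 0, so the exact-division identities hold
      have hc0 : PySem.List.pyGetD ciphers 0 0 ≠ 0 := by
        rcases h2 with h | h
        · exact h
        · rw [hfi] at h; exfalso; simp at h; omega
      set c0 := PySem.List.pyGetD ciphers 0 0 with hc0def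
      set g0 : Int := (Int.gcd c0 (PySem.List.pyGetD ciphers (idx : Int) 0) : Int) with hg0def
      have hgne : g0 ≠ 0 := by
        rw [hg0def]
        simp only [ne_eq, Int.natCast_eq_zero, Int.gcd_eq_zero_iff]
        intro h
        exact hc0 h.1
      have hdvd : g0 ∣ c0 := Int.gcd_dvd_left _ _
      have hmul : PySem.Int.floordiv c0 g0 * g0 = c0 := by
        have h := PySem.Int.floordiv_mul_add_mod c0 g0
        rwa [(PySem.Int.mod_eq_zero_iff_dvd c0 g0).mpr hdvd, add_zero] at h
      have hqne : PySem.Int.floordiv c0 g0 ≠ 0 := by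
        intro h
        exact hc0 (by rw [← hmul, h, zero_mul])
      have hqdvd : PySem.Int.floordiv c0 g0 ∣ c0 := ⟨g0, hmul.symm⟩
      have hgfact : PySem.Int.floordiv c0 (PySem.Int.floordiv c0 g0) = g0 := by
        have h := PySem.Int.floordiv_mul_add_mod c0 (PySem.Int.floordiv c0 g0)
        rw [(PySem.Int.mod_eq_zero_iff_dvd _ _).mpr hqdvd, add_zero] at h
        have h2 : PySem.Int.floordiv c0 (PySem.Int.floordiv c0 g0) * PySem.Int.floordiv c0 g0
            = g0 * PySem.Int.floordiv c0 g0 := by linear_combination h - hmul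
        exact mul_right_cancel₀ hqne h2
      exact pv_back_pattern c0 g0 (PySem.Int.floordiv c0 g0) rfl hgfact idx
  -- the parity pattern ends with the pivot g
  obtain ⟨acc, hacc⟩ := pv_pattern_concat
    (Int.gcd (PySem.List.pyGetD ciphers 0 0) (PySem.List.pyGetD ciphers (idx : Int) 0) : Int)
    (PySem.Int.floordiv (PySem.List.pyGetD ciphers 0 0)
      (Int.gcd (PySem.List.pyGetD ciphers 0 0) (PySem.List.pyGetD ciphers (idx : Int) 0) : Int))
    (idx - 1)
  have he : idx - 1 + 1 + 1 = idx + 1 := by omega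
  rw [he] at hacc
  unfold Spec_solve_cryptopangram
  simp only [solve_cryptopangram, solve_cryptopangram_alt, hfi]
  rw [pvRepeat_natCast, pvRepeat_natCast, hback, hacc]
  rw [pv_fwd_eq]
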